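-- pv_equiv track=rewrite | github.com/Paldrin-ux/MED-AI | app/lab_routes.py | _merge_patient_info
-- ===== SOURCE A (Python) =====
-- def _merge_patient_info(panels: list[dict]) -> dict:
--     """
--     Pick patient demographics from the first panel that has them.
--     Prefer values that are not "Not specified".
--     """
--     fields = ["patient_name", "patient_age", "patient_id",
--               "test_date", "ordering_physician", "facility"]
--     merged = {f: "Not specified" for f in fields}
--     for panel in panels:
--         for f in fields:
--             if merged[f] in ("Not specified", "", None):
--                 merged[f] = panel.get(f, "Not specified") or "Not specified"
--     return merged
-- ===== SOURCE B (Python) =====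
-- def _merge_patient_info(panels: list[dict]) -> dict:
--     """Field-major merge: for each field take the first usable value across panels."""
--     fields = ["patient_name", "patient_age", "patient_id",
--               "test_date", "ordering_physician", "facility"]
--     return {f: next((v for panel in panels
--                        if (v := panel.get(f)) and v != "Not specified"),
--                     "Not specified")
--             for f in fields}
-- ===== Notes on version B (the rewrite author's own statement) =====
-- stated objective: alternative
-- what changed: Loop nesting inverted to field-major: for each of the six fields B scans panels once with an early exit at the first truthy value != 'Not specified' (a generator with next), instead of A's panel-major pass mutating a dict of remaining fields; same O(|panels|) cost, no dict state.
import Mathlib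
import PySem

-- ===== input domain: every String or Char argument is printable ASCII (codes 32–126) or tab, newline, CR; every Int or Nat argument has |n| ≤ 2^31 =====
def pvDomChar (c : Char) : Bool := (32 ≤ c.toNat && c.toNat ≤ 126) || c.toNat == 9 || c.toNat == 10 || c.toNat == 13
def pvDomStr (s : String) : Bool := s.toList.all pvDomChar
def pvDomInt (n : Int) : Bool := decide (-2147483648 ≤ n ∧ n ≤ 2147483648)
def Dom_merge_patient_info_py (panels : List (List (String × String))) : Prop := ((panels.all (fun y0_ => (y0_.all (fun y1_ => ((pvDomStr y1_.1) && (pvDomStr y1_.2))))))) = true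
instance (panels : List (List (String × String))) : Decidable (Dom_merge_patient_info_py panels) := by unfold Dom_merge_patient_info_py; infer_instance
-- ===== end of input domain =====

-- B inverts A's loop nesting to field-major: per-field scan of the panels with an early exit,
-- instead of A's panel-major pass mutating a dict of remaining fields; same values, same cost.

-- ===== PORT A =====
def pvFields : List String :=
  ["patient_name", "patient_age", "patient_id",
   "test_date", "ordering_physician", "facility"]

-- A's inner-loop body.  `merged[f]` is ported as `getD m f ""`: the key is always present
-- (merged carries all six fields throughout), so this is exact wherever the Python returns.
def pvStepA (panel : List (String × String)) (m : PySem.Dict String String) (f : String) : PySem.Dict String String :=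
  if m.getD f "" = "Not specified" ∨ m.getD f "" = "" then
    m.insert f (if (PySem.Dict.ofList panel).getD f "Not specified" = "" then "Not specified"
                else (PySem.Dict.ofList panel).getD f "Not specified")
  else m

def merge_patient_info_py (panels : List (List (String × String))) : List (String × String) :=
  let merged := PySem.Dict.ofList (pvFields.map (fun f => (f, "Not specified")))
  let merged := panels.foldl (fun m panel => pvFields.foldl (pvStepA panel) m) merged
  merged.items

-- ===== PORT B =====
-- next((v for panel in panels if (v := panel.get(f)) and v != "Not specified"), "Not specified")
def pvFirstGood (panels : List (List (String × String))) (f : String) : String :=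
  match panels with
  | [] => "Not specified"
  | p :: rest =>
    match (PySem.Dict.ofList p).get? f with
    | some v => if v ≠ "" ∧ v ≠ "Not specified" then v else pvFirstGood rest f
    | none => pvFirstGood rest f

def merge_patient_info_py_alt (panels : List (List (String × String))) : List (String × String) :=
  pvFields.map (fun f => (f, pvFirstGood panels f))

-- ===== PRECONDITION & SPEC =====
def Spec_merge_patient_info_py (panels : List (List (String × String))) (out : List (String × String)) : Prop := out = merge_patient_info_py_alt panels
instance (panels : List (List (String × String))) (out : List (String × String)) : Decidable (Spec_merge_patient_info_py panels out) := by unfold Spec_merge_patient_info_py; infer_instance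

-- ===== CLAIM (what is proved, stated in full; the proofs are below) =====
def Claim_equal_merge_patient_info_py : Prop := ∀ (panels : List (List (String × String))), Dom_merge_patient_info_py panels → Spec_merge_patient_info_py panels (merge_patient_info_py panels)

-- ===== LEMMAS AND PROOFS =====

-- value a field holds after A processes one panel, given its current value v
def pvUpd (panel : List (String × String)) (f v : String) : String :=
  if v = "Not specified" ∨ v = "" then
    (if (PySem.Dict.ofList panel).getD f "Not specified" = "" then "Not specified"
     else (PySem.Dict.ofList panel).getD f "Not specified")
  else v

-- a field's final value, given its value v after the processed prefix and the rest's first-good value r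
def pvPick (v r : String) : String :=
  if v = "Not specified" ∨ v = "" then r else v

lemma pvUpd_ne_empty (panel : List (String × String)) (f v : String) (hv : v ≠ "") :
    pvUpd panel f v ≠ "" := by
  unfold pvUpd
  split_ifs with h1 h2
  · decide
  · exact h2
  · exact hv

lemma pvPick_ns (v : String) (hv : v ≠ "") : pvPick v "Not specified" = v := by
  unfold pvPick
  split_ifs with h
  · rcases h with h | h
    · exact h.symm
    · exact absurd h hv
  · rfl

lemma pvFirstGood_cons (p : List (String × String)) (ps : List (List (String × String))) (f : String) :
    pvFirstGood (p :: ps) f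
      = (match (PySem.Dict.ofList p).get? f with
         | some v => if v ≠ "" ∧ v ≠ "Not specified" then v else pvFirstGood ps f
         | none => pvFirstGood ps f) := rfl

lemma pvPick_upd (p : List (String × String)) (ps : List (List (String × String))) (f v : String) :
    pvPick (pvUpd p f v) (pvFirstGood ps f) = pvPick v (pvFirstGood (p :: ps) f) := by
  by_cases hb : v = "Not specified" ∨ v = ""
  · have hrhs : pvPick v (pvFirstGood (p :: ps) f) = pvFirstGood (p :: ps) f := by
      unfold pvPick; rw [if_pos hb]
    rw [hrhs, pvFirstGood_cons]
    unfold pvUpd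
    rw [if_pos hb, PySem.Dict.getD_eq_get?_getD]
    rcases hg : (PySem.Dict.ofList p).get? f with _ | x
    · simp [pvPick]
    · by_cases hx1 : x = ""
      · simp [pvPick, hx1]
      · by_cases hx2 : x = "Not specified"
        · simp [pvPick, hx2]
        · simp [pvPick, hx1, hx2]
  · unfold pvUpd pvPick
    rw [if_neg hb, if_neg hb, if_neg hb]

-- one application of A's inner-loop body on the six-field dict, one lemma per field
lemma pvStep_1 (panel : List (String × String)) (a b c d e f' : String) :
  pvStepA panel (PySem.Dict.mk [("patient_name",a),("patient_age",b),("patient_id",c),("test_date",d),("ordering_physician",e),("facility",f')]) "patient_name"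
  = PySem.Dict.mk [("patient_name",pvUpd panel "patient_name" a),("patient_age",b),("patient_id",c),("test_date",d),("ordering_physician",e),("facility",f')] := by
  have hg : (PySem.Dict.mk [("patient_name",a),("patient_age",b),("patient_id",c),("test_date",d),("ordering_physician",e),("facility",f')]).getD "patient_name" "" = a := by
    simp [PySem.Dict.getD_eq_get?_getD, PySem.Dict.get?_mk_cons]
  unfold pvStepA pvUpd
  rw [hg]
  split_ifs <;> rfl

lemma pvStep_2 (panel : List (String × String)) (a b c d e f' : String) :
  pvStepA panel (PySem.Dict.mk [("patient_name",a),("patient_age",b),("patient_id",c),("test_date",d),("ordering_physician",e),("facility",f')]) "patient_age"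
  = PySem.Dict.mk [("patient_name",a),("patient_age",pvUpd panel "patient_age" b),("patient_id",c),("test_date",d),("ordering_physician",e),("facility",f')] := by
  have hg : (PySem.Dict.mk [("patient_name",a),("patient_age",b),("patient_id",c),("test_date",d),("ordering_physician",e),("facility",f')]).getD "patient_age" "" = b := by
    simp [PySem.Dict.getD_eq_get?_getD, PySem.Dict.get?_mk_cons]
  unfold pvStepA pvUpd
  rw [hg]
  split_ifs <;> rfl

lemma pvStep_3 (panel : List (String × String)) (a b c d e f' : String) :
  pvStepA panel (PySem.Dict.mk [("patient_name",a),("patient_age",b),("patient_id",c),("test_date",d),("ordering_physician",e),("facility",f')]) "patient_id"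
  = PySem.Dict.mk [("patient_name",a),("patient_age",b),("patient_id",pvUpd panel "patient_id" c),("test_date",d),("ordering_physician",e),("facility",f')] := by
  have hg : (PySem.Dict.mk [("patient_name",a),("patient_age",b),("patient_id",c),("test_date",d),("ordering_physician",e),("facility",f')]).getD "patient_id" "" = c := by
    simp [PySem.Dict.getD_eq_get?_getD, PySem.Dict.get?_mk_cons]
  unfold pvStepA pvUpd
  rw [hg]
  split_ifs <;> rfl

lemma pvStep_4 (panel : List (String × String)) (a b c d e f' : String) :
  pvStepA panel (PySem.Dict.mk [("patient_name",a),("patient_age",b),("patient_id",c),("test_date",d),("ordering_physician",e),("facility",f')]) "test_date"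
  = PySem.Dict.mk [("patient_name",a),("patient_age",b),("patient_id",c),("test_date",pvUpd panel "test_date" d),("ordering_physician",e),("facility",f')] := by
  have hg : (PySem.Dict.mk [("patient_name",a),("patient_age",b),("patient_id",c),("test_date",d),("ordering_physician",e),("facility",f')]).getD "test_date" "" = d := by
    simp [PySem.Dict.getD_eq_get?_getD, PySem.Dict.get?_mk_cons]
  unfold pvStepA pvUpd
  rw [hg]
  split_ifs <;> rfl

lemma pvStep_5 (panel : List (String × String)) (a b c d e f' : String) :
  pvStepA panel (PySem.Dict.mk [("patient_name",a),("patient_age",b),("patient_id",c),("test_date",d),("ordering_physician",e),("facility",f')]) "ordering_physician"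
  = PySem.Dict.mk [("patient_name",a),("patient_age",b),("patient_id",c),("test_date",d),("ordering_physician",pvUpd panel "ordering_physician" e),("facility",f')] := by
  have hg : (PySem.Dict.mk [("patient_name",a),("patient_age",b),("patient_id",c),("test_date",d),("ordering_physician",e),("facility",f')]).getD "ordering_physician" "" = e := by
    simp [PySem.Dict.getD_eq_get?_getD, PySem.Dict.get?_mk_cons]
  unfold pvStepA pvUpd
  rw [hg]
  split_ifs <;> rfl

lemma pvStep_6 (panel : List (String × String)) (a b c d e f' : String) :
  pvStepA panel (PySem.Dict.mk [("patient_name",a),("patient_age",b),("patient_id",c),("test_date",d),("ordering_physician",e),("facility",f')]) "facility"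
  = PySem.Dict.mk [("patient_name",a),("patient_age",b),("patient_id",c),("test_date",d),("ordering_physician",e),("facility",pvUpd panel "facility" f')] := by
  have hg : (PySem.Dict.mk [("patient_name",a),("patient_age",b),("patient_id",c),("test_date",d),("ordering_physician",e),("facility",f')]).getD "facility" "" = f' := by
    simp [PySem.Dict.getD_eq_get?_getD, PySem.Dict.get?_mk_cons]
  unfold pvStepA pvUpd
  rw [hg]
  split_ifs <;> rfl

-- A's inner loop over the six fields, on the six-field dict
lemma pvInner (panel : List (String × String)) (a b c d e f' : String) :
  pvFields.foldl (pvStepA panel) (PySem.Dict.mk [("patient_name",a),("patient_age",b),("patient_id",c),("test_date",d),("ordering_physician",e),("facility",f')])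
  = PySem.Dict.mk [("patient_name",pvUpd panel "patient_name" a),("patient_age",pvUpd panel "patient_age" b),("patient_id",pvUpd panel "patient_id" c),("test_date",pvUpd panel "test_date" d),("ordering_physician",pvUpd panel "ordering_physician" e),("facility",pvUpd panel "facility" f')] := by
  simp only [pvFields, List.foldl]
  rw [pvStep_1, pvStep_2, pvStep_3, pvStep_4, pvStep_5, pvStep_6]

-- A's outer loop, with the state generalized: each field ends at pvPick of its current value
-- and B's per-field first-good scan of the remaining panels
lemma pvOuter (panels : List (List (String × String))) (a b c d e f' : String)
    (ha : a ≠ "") (hb : b ≠ "") (hc : c ≠ "") (hd : d ≠ "") (he : e ≠ "") (hf : f' ≠ "") :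
  panels.foldl (fun m panel => pvFields.foldl (pvStepA panel) m)
      (PySem.Dict.mk [("patient_name",a),("patient_age",b),("patient_id",c),("test_date",d),("ordering_physician",e),("facility",f')])
  = PySem.Dict.mk [("patient_name",pvPick a (pvFirstGood panels "patient_name")),
                   ("patient_age",pvPick b (pvFirstGood panels "patient_age")),
                   ("patient_id",pvPick c (pvFirstGood panels "patient_id")),
                   ("test_date",pvPick d (pvFirstGood panels "test_date")),
                   ("ordering_physician",pvPick e (pvFirstGood panels "ordering_physician")),
                   ("facility",pvPick f' (pvFirstGood panels "facility"))] := by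
  induction panels generalizing a b c d e f' with
  | nil =>
    simp only [List.foldl]
    unfold pvFirstGood
    rw [pvPick_ns a ha, pvPick_ns b hb, pvPick_ns c hc, pvPick_ns d hd, pvPick_ns e he, pvPick_ns f' hf]
  | cons p ps ih =>
    simp only [List.foldl]
    rw [pvInner]
    rw [ih _ _ _ _ _ _ (pvUpd_ne_empty p _ a ha) (pvUpd_ne_empty p _ b hb) (pvUpd_ne_empty p _ c hc)
        (pvUpd_ne_empty p _ d hd) (pvUpd_ne_empty p _ e he) (pvUpd_ne_empty p _ f' hf)]
    rw [pvPick_upd, pvPick_upd, pvPick_upd, pvPick_upd, pvPick_upd, pvPick_upd]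

-- ===== VERDICT (by name: the statement is the Claim_ definition above) =====
theorem merge_patient_info_py_spec : Claim_equal_merge_patient_info_py := by
  intro panels _
  simp only [Spec_merge_patient_info_py, merge_patient_info_py, merge_patient_info_py_alt]
  have h0 : PySem.Dict.ofList (pvFields.map (fun f => (f, "Not specified")))
      = PySem.Dict.mk [("patient_name","Not specified"),("patient_age","Not specified"),("patient_id","Not specified"),("test_date","Not specified"),("ordering_physician","Not specified"),("facility","Not specified")] := by
    decide
  rw [h0,
    pvOuter panels "Not specified" "Not specified" "Not specified" "Not specified" "Not specified" "Not specified"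
      (by decide) (by decide) (by decide) (by decide) (by decide) (by decide)]
  have hp : ∀ r : String, pvPick "Not specified" r = r := fun r => by
    unfold pvPick; rw [if_pos (Or.inl rfl)]
  simp only [hp, pvFields, List.map]
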